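-- pv_equiv track=rewrite | github.com/stevensanche/Waldo-Mini-Master- | waldo-mini-master/waldo.py | all_col_exists_waldo
-- ===== SOURCE A (Python) =====
-- Waldo = 'W'
--
-- def all_col_exists_waldo(matrix: list) -> bool:
--     if len(matrix) == 0:
--         return True
--     else:
--         for c in range(len(matrix[0])):
--             waldo_c = 0
--             for r in range(len(matrix)):
--                 if Waldo in matrix[r][c]:
--                     waldo_c +=1
--             if waldo_c == 0:
--                 return False
--     return True
-- ===== SOURCE B (Python) =====
-- Waldo = 'W'
--
-- def all_col_exists_waldo(matrix: list) -> bool: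
--     # Single row-major pass: collect the set of covered column indices, then
--     # compare its size with the number of columns.
--     ncols = len(matrix[0]) if matrix else 0
--     covered = set()
--     for row in matrix:
--         for c, cell in enumerate(row):
--             if c < ncols and Waldo in cell:
--                 covered.add(c)
--     return len(covered) == ncols
-- ===== Notes on version B (the rewrite author's own statement) =====
-- stated objective: alternative
-- what changed: Replaced the column-by-column nested scan with early return by a single row-major pass that accumulates the set of covered column indices and compares its size with the column count.
-- outside the precondition, e.g. on all_col_exists_waldo([['a', 'b'], ['x']]): A returns False, B returns False; on all_col_exists_waldo([['Wa', 'Wb'], ['Wx']]): A raises IndexError, B returns True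
import Mathlib
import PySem

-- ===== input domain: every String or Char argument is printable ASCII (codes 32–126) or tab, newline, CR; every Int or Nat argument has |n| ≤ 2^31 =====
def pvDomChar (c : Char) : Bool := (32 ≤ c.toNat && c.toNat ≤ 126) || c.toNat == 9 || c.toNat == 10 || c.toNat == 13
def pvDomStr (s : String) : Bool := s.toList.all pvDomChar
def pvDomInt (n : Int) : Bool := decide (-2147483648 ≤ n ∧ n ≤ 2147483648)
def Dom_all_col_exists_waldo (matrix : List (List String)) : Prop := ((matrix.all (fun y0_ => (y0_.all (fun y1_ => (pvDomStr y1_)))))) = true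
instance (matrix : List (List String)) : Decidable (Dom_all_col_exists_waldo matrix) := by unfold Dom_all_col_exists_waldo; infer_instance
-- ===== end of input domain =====

-- B replaces the column-by-column scan (with early return) by one row-major pass collecting
-- the set of covered columns; no mutation, return value only.

-- ===== PORT A =====
-- inner loop of A: count rows whose cell at column c contains 'W' (pyGetD exact under Pre_: all indices in range)
def pvA_colCount (matrix : List (List String)) (c : Int) : Int :=
  (PySem.List.pyRange 0 (PySem.List.len matrix) 1).foldl
    (fun acc r =>
      if PySem.Str.isIn "W" (PySem.List.pyGetD (PySem.List.pyGetD matrix r []) c "") then acc + 1 else acc) 0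

-- outer loop of A over columns, with A's early `return False`
def pvA_cols (matrix : List (List String)) : List Int → Bool
  | [] => true
  | c :: rest => if pvA_colCount matrix c = 0 then false else pvA_cols matrix rest

def all_col_exists_waldo (matrix : List (List String)) : Bool :=
  if matrix.length = 0 then true
  else pvA_cols matrix (PySem.List.pyRange 0 (PySem.List.len (matrix.headD [])) 1)

-- ===== PORT B =====
-- inner loop of B: for c, cell in enumerate(row): if c < ncols and Waldo in cell: covered.add(c)
def pvB_row (ncols : Int) (s : PySem.Set Int) (row : List String) : PySem.Set Int :=
  (PySem.List.enumerate row 0).foldl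
    (fun s p => if decide (p.1 < ncols) && PySem.Str.isIn "W" p.2 then PySem.Set.add s p.1 else s) s

def all_col_exists_waldo_alt (matrix : List (List String)) : Bool :=
  let ncols : Int := if matrix.length ≠ 0 then PySem.List.len (matrix.headD []) else 0
  let covered : PySem.Set Int := matrix.foldl (pvB_row ncols) PySem.Set.empty
  decide ((covered.length : Int) = ncols)

-- ===== PRECONDITION & SPEC =====
-- Pre_ excludes ragged matrices (a row shorter than the first row): on some of those A raises
-- IndexError mid-scan, and B's single-pass scan cannot reproduce a raise (see cites for an
-- excluded input on which A still returns).
def Pre_all_col_exists_waldo (matrix : List (List String)) : Prop :=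
  ∀ row ∈ matrix, (matrix.headD []).length ≤ row.length
instance (matrix : List (List String)) : Decidable (Pre_all_col_exists_waldo matrix) := by
  unfold Pre_all_col_exists_waldo; infer_instance

def pvWitness_all_col_exists_waldo : List (List String) := [["W", "xW"], ["a", "b"]]

def Spec_all_col_exists_waldo (matrix : List (List String)) (out : Bool) : Prop := out = all_col_exists_waldo_alt matrix
instance (matrix : List (List String)) (out : Bool) : Decidable (Spec_all_col_exists_waldo matrix out) := by unfold Spec_all_col_exists_waldo; infer_instance

-- ===== CLAIM (what is proved, stated in full; the proofs are below) =====
def Claim_equal_all_col_exists_waldo : Prop := ∀ (matrix : List (List String)), Dom_all_col_exists_waldo matrix → Pre_all_col_exists_waldo matrix → Spec_all_col_exists_waldo matrix (all_col_exists_waldo matrix)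

-- ===== LEMMAS AND PROOFS =====

-- the common semantic predicate: column c is covered by some row
def pvCov (matrix : List (List String)) (c : Int) : Prop :=
  ∃ row ∈ matrix, PySem.Str.isIn "W" (PySem.List.pyGetD row c "") = true

-- A-side: the counting foldl adds countP
theorem pvA_foldl_count (l : List (List String)) (p : List String → Bool) (acc : Int) :
    l.foldl (fun a row => if p row then a + 1 else a) acc = acc + l.countP p := by
  induction l generalizing acc with
  | nil => simp
  | cons x xs ih =>
    simp only [List.foldl_cons, List.countP_cons, ih]
    by_cases h : p x = true
    · simp [h]; omega
    · simp [h]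

theorem pvA_colCount_eq_zero_iff (matrix : List (List String)) (c : Int) :
    pvA_colCount matrix c = 0 ↔ ¬ pvCov matrix c := by
  unfold pvA_colCount
  rw [PySem.List.foldl_pyRange_pyGetD matrix ([] : List String)
        (fun acc row => if PySem.Str.isIn "W" (PySem.List.pyGetD row c "") then acc + 1 else acc)
        0 (by norm_num)]
  simp only [Int.toNat_zero, List.drop_zero]
  rw [pvA_foldl_count]
  simp only [zero_add]
  constructor
  · intro h hcov
    obtain ⟨row, hrow, hin⟩ := hcov
    have : 0 < matrix.countP (fun row => PySem.Str.isIn "W" (PySem.List.pyGetD row c "")) :=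
      List.countP_pos_iff.mpr ⟨row, hrow, hin⟩
    omega
  · intro h
    have : matrix.countP (fun row => PySem.Str.isIn "W" (PySem.List.pyGetD row c "")) = 0 := by
      rw [List.countP_eq_zero]
      intro row hrow
      simp only [Bool.not_eq_true]
      by_contra hb
      exact h ⟨row, hrow, by simpa using hb⟩
    omega

theorem pvA_cols_eq_true_iff (matrix : List (List String)) (cs : List Int) :
    pvA_cols matrix cs = true ↔ ∀ c ∈ cs, pvCov matrix c := by
  induction cs with
  | nil => simp [pvA_cols]
  | cons c rest ih =>
    simp only [pvA_cols]
    by_cases h : pvA_colCount matrix c = 0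
    · simp only [h, if_true]
      constructor
      · intro hf; cases hf
      · intro hall
        exact absurd (hall c (List.mem_cons_self)) ((pvA_colCount_eq_zero_iff matrix c).mp h)
    · simp only [h, if_false, ih]
      constructor
      · intro hall d hd
        rcases List.mem_cons.mp hd with rfl | hd'
        · exact not_not.mp (fun hc => h ((pvA_colCount_eq_zero_iff matrix d).mpr hc))
        · exact hall d hd'
      · intro hall d hd; exact hall d (List.mem_cons_of_mem _ hd)

-- B-side: membership in a conditional-add fold, for an abstract condition
theorem pvB_mem_foldl_pairs (cond : Int × String → Bool) (l : List (Int × String))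
    (s : PySem.Set Int) (x : Int) :
    x ∈ l.foldl (fun s p => if cond p then PySem.Set.add s p.1 else s) s ↔
      x ∈ s ∨ ∃ p ∈ l, cond p = true ∧ x = p.1 := by
  induction l generalizing s with
  | nil => simp
  | cons q l ih =>
    simp only [List.foldl_cons, ih, List.mem_cons]
    by_cases h : cond q = true
    · rw [if_pos h]
      constructor
      · rintro (hq | ⟨p, hp, hc, rfl⟩)
        · rcases (PySem.Set.mem_add s q.1 x).mp hq with hs | rfl
          · exact Or.inl hs
          · exact Or.inr ⟨q, Or.inl rfl, h, rfl⟩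
        · exact Or.inr ⟨p, Or.inr hp, hc, rfl⟩
      · rintro (hs | ⟨p, hp | hp, hc, rfl⟩)
        · exact Or.inl ((PySem.Set.mem_add s q.1 x).mpr (Or.inl hs))
        · subst hp; exact Or.inl ((PySem.Set.mem_add s p.1 p.1).mpr (Or.inr rfl))
        · exact Or.inr ⟨p, hp, hc, rfl⟩
    · rw [if_neg h]
      constructor
      · rintro (hs | ⟨p, hp, hc, rfl⟩)
        · exact Or.inl hs
        · exact Or.inr ⟨p, Or.inr hp, hc, rfl⟩
      · rintro (hs | ⟨p, hp | hp, hc, rfl⟩)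
        · exact Or.inl hs
        · subst hp; exact absurd hc h
        · exact Or.inr ⟨p, hp, hc, rfl⟩

theorem pvB_nodup_foldl_pairs (cond : Int × String → Bool) (l : List (Int × String))
    (s : PySem.Set Int) (hs : s.Nodup) :
    (l.foldl (fun s p => if cond p then PySem.Set.add s p.1 else s) s).Nodup := by
  induction l generalizing s with
  | nil => exact hs
  | cons q l ih =>
    simp only [List.foldl_cons]
    by_cases h : cond q = true
    · rw [if_pos h]; exact ih _ (PySem.Set.nodup_add s q.1 hs)
    · rw [if_neg h]; exact ih _ hs

theorem pvB_mem_row (ncols : Int) (s : PySem.Set Int) (row : List String) (x : Int) :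
    x ∈ pvB_row ncols s row ↔
      x ∈ s ∨ ∃ k : Nat, k < row.length ∧ (k : Int) < ncols ∧
        PySem.Str.isIn "W" (row.getD k "") = true ∧ x = (k : Int) := by
  unfold pvB_row
  rw [pvB_mem_foldl_pairs]
  constructor
  · rintro (hs | ⟨p, hp, hc, rfl⟩)
    · exact Or.inl hs
    · obtain ⟨k, hk, rfl⟩ := (PySem.List.mem_enumerate_iff row 0 p).mp hp
      rw [Bool.and_eq_true, decide_eq_true_iff] at hc
      refine Or.inr ⟨k, hk, by simpa using hc.1, ?_, by simp⟩
      simpa [List.getD_eq_getElem?_getD, List.getElem?_eq_getElem hk] using hc.2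
  · rintro (hs | ⟨k, hk, hlt, hin, rfl⟩)
    · exact Or.inl hs
    · refine Or.inr ⟨((k : Int), row[k]), (PySem.List.mem_enumerate_iff row 0 _).mpr ⟨k, hk, by simp⟩, ?_, rfl⟩
      rw [Bool.and_eq_true, decide_eq_true_iff]
      exact ⟨by simpa using hlt, by simpa [List.getD_eq_getElem?_getD, List.getElem?_eq_getElem hk] using hin⟩

theorem pvB_mem_covered (ncols : Int) (matrix : List (List String)) (s : PySem.Set Int) (x : Int) :
    x ∈ matrix.foldl (pvB_row ncols) s ↔
      x ∈ s ∨ ∃ row ∈ matrix, ∃ k : Nat, k < row.length ∧ (k : Int) < ncols ∧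
        PySem.Str.isIn "W" (row.getD k "") = true ∧ x = (k : Int) := by
  induction matrix generalizing s with
  | nil => simp
  | cons r m ih =>
    simp only [List.foldl_cons, ih, pvB_mem_row, List.mem_cons]
    constructor
    · rintro ((hs | ⟨k, h1, h2, h3, rfl⟩) | ⟨row, hrow, hex⟩)
      · exact Or.inl hs
      · exact Or.inr ⟨r, Or.inl rfl, k, h1, h2, h3, rfl⟩
      · exact Or.inr ⟨row, Or.inr hrow, hex⟩
    · rintro (hs | ⟨row, hrow | hrow, hex⟩)
      · exact Or.inl (Or.inl hs)
      · subst hrow; exact Or.inl (Or.inr hex)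
      · exact Or.inr ⟨row, hrow, hex⟩

theorem pvB_nodup_covered (ncols : Int) (matrix : List (List String)) (s : PySem.Set Int)
    (hs : s.Nodup) : (matrix.foldl (pvB_row ncols) s).Nodup := by
  induction matrix generalizing s with
  | nil => exact hs
  | cons r m ih => exact ih _ (pvB_nodup_foldl_pairs _ _ s hs)

-- two nodup lists with l ⊆ S: equal lengths ↔ S ⊆ l
theorem pv_len_eq_iff (l S : List Int) (hl : l.Nodup) (hS : S.Nodup) (hsub : l ⊆ S) :
    l.length = S.length ↔ ∀ x ∈ S, x ∈ l := by
  constructor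
  · intro hlen x hx
    have hcard : S.toFinset.card ≤ l.toFinset.card := by
      rw [List.toFinset_card_of_nodup hl, List.toFinset_card_of_nodup hS, hlen]
    have hfs : l.toFinset ⊆ S.toFinset := fun a ha => by
      simp only [List.mem_toFinset] at *; exact hsub ha
    have heq := Finset.eq_of_subset_of_card_le hfs hcard
    exact List.mem_toFinset.mp (heq ▸ List.mem_toFinset.mpr hx)
  · intro hsup
    have h1 : l.toFinset = S.toFinset := by
      apply Finset.Subset.antisymm
      · intro a ha; simp only [List.mem_toFinset] at *; exact hsub ha
      · intro a ha; simp only [List.mem_toFinset] at *; exact hsup a ha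
    rw [← List.toFinset_card_of_nodup hl, ← List.toFinset_card_of_nodup hS, h1]

-- ===== VERDICT (by name: the statement is the Claim_ definition above) =====
theorem all_col_exists_waldo_spec : Claim_equal_all_col_exists_waldo := by
  unfold Claim_equal_all_col_exists_waldo Spec_all_col_exists_waldo
  intro matrix _ hpre
  unfold all_col_exists_waldo all_col_exists_waldo_alt
  by_cases hm : matrix.length = 0
  · have : matrix = [] := List.length_eq_zero_iff.mp hm
    subst this
    simp
  · simp only [hm, if_false, ne_eq, not_false_iff, if_true]
    set ncols : Int := PySem.List.len (matrix.headD []) with hnc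
    have hncn : ncols = ((matrix.headD []).length : Int) := by
      simp [hnc, PySem.List.len]
    set covered := matrix.foldl (pvB_row ncols) PySem.Set.empty with hcov
    have hnodup : covered.Nodup := pvB_nodup_covered _ _ _ (by simp [PySem.Set.empty])
    have hmem : ∀ x, x ∈ covered ↔ ∃ row ∈ matrix, ∃ k : Nat, k < row.length ∧ (k : Int) < ncols ∧
        PySem.Str.isIn "W" (row.getD k "") = true ∧ x = (k : Int) := by
      intro x
      rw [hcov, pvB_mem_covered]
      simp [PySem.Set.empty]
    have hsub : covered ⊆ PySem.List.pyRange 0 ncols 1 := by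
      intro x hx
      obtain ⟨row, hrow, k, hk1, hk2, hk3, rfl⟩ := (hmem x).mp hx
      rw [PySem.List.mem_pyRange_one]
      exact ⟨by positivity, hk2⟩
    have hSnodup : (PySem.List.pyRange 0 ncols 1).Nodup := PySem.List.nodup_pyRange_one 0 ncols
    have hSlen : (PySem.List.pyRange 0 ncols 1).length = ncols.toNat := by
      rw [PySem.List.length_pyRange_one]; simp
    have hnc0 : 0 ≤ ncols := by rw [hncn]; positivity
    -- bridge: pvCov ↔ B's condition, for 0 ≤ c < ncols, under Pre_
    have hbridge : ∀ c : Int, 0 ≤ c → c < ncols →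
        (pvCov matrix c ↔ ∃ row ∈ matrix, ∃ k : Nat, k < row.length ∧ (k : Int) < ncols ∧
          PySem.Str.isIn "W" (row.getD k "") = true ∧ c = (k : Int)) := by
      intro c hc0 hcn
      constructor
      · rintro ⟨row, hrow, hin⟩
        have hlen : (matrix.headD []).length ≤ row.length := hpre row hrow
        have hklt : c.toNat < row.length := by rw [hncn] at hcn; omega
        refine ⟨row, hrow, c.toNat, hklt, by omega, ?_, by omega⟩
        rw [PySem.List.pyGetD_of_nonneg row "" hc0] at hin
        exact hin
      · rintro ⟨row, hrow, k, hk1, hk2, hk3, rfl⟩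
        refine ⟨row, hrow, ?_⟩
        rw [PySem.List.pyGetD_natCast]
        exact hk3
    rw [Bool.eq_iff_iff, pvA_cols_eq_true_iff, decide_eq_true_iff]
    rw [show ((covered.length : Int) = ncols ↔ covered.length = ncols.toNat) from by omega]
    rw [← hSlen, pv_len_eq_iff covered _ hnodup hSnodup hsub]
    constructor
    · intro hall x hx
      have hx' := PySem.List.mem_pyRange_one.mp hx
      rw [hmem]
      exact (hbridge x hx'.1 hx'.2).mp (hall x hx)
    · intro hall c hc
      have hc' := PySem.List.mem_pyRange_one.mp hc
      exact (hbridge c hc'.1 hc'.2).mpr ((hmem c).mp (hall c hc))
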